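-- pv_equiv track=rewrite | github.com/su-3i025-projet/coop-pathfinding-javidz | teaching-iaro/pySpriteWorld-forStudents/DiscreteWorld-coopPathFinding.py | nearestGoal
-- ===== SOURCE A (Python) =====
-- def manhattan(x1,y1,x2,y2): #renvoie la distance de manhattan entre (x1,y1) et (x2,y2)
--     return abs(x1-x2)+abs(y1-y2)
--
-- class Node: #classe noeud utilisee pour representer les cases de la map
--     def __init__(self,x,y,dParcourue,dMan,parent=None):
--         self.parent = parent
--         self.dParcourue = dParcourue
--         self.dMan = dMan
--         self.x = x
--         self.y = y
--
-- def ajouteFront(noeud,wallStates,xFiole,yFiole): #ajoute les 4 cases alentours si elles ne sont pas des obstacles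
--     l=[]
--     if(((noeud.x+1,noeud.y) not in wallStates) and (noeud.x+1 >= 0) and (noeud.y >= 0) and (noeud.x+1 <= 19) and (noeud.y <= 19)):
--         dMan = manhattan(noeud.x+1,noeud.y,xFiole,yFiole)
--         l.append(Node(noeud.x+1,noeud.y,noeud.dParcourue+1,dMan,noeud))
--     if(((noeud.x-1,noeud.y) not in wallStates) and (noeud.x-1 >= 0) and (noeud.y >= 0) and (noeud.x-1 <= 19) and (noeud.y <= 19)):
--         dMan = manhattan(noeud.x-1,noeud.y,xFiole,yFiole)
--         l.append(Node(noeud.x-1,noeud.y,noeud.dParcourue+1,dMan,noeud))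
--     if(((noeud.x,noeud.y+1) not in wallStates) and (noeud.x >= 0) and (noeud.y+1 >= 0) and (noeud.x <= 19) and (noeud.y+1 <= 19)):
--         dMan = manhattan(noeud.x,noeud.y+1,xFiole,yFiole)
--         l.append(Node(noeud.x,noeud.y+1,noeud.dParcourue+1,dMan,noeud))
--     if(((noeud.x,noeud.y-1) not in wallStates) and (noeud.x >= 0) and (noeud.y-1 >= 0) and (noeud.x <= 19) and (noeud.y-1 <= 19)):
--         dMan = manhattan(noeud.x,noeud.y-1,xFiole,yFiole)
--         l.append(Node(noeud.x,noeud.y-1,noeud.dParcourue+1,dMan,noeud))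
--     return l
--
-- def minPar(listNoeud): #renvoie la noeud avec la distance parcourue la plus petite
--     mini = listNoeud[0].dParcourue
--     n = listNoeud[0]
--     for i in listNoeud:
--         if i.dParcourue < mini:
--             n = i
--             mini = i.dParcourue
--     return n
--
-- def nearestGoal(posPlayer,wallStates,goalStates): #renvoie l indice de la fiole la plus proche du joueur
--     xPlayer = posPlayer[0]
--     yPlayer = posPlayer[1]
--     dist = 10000 #distance de la fiole la plus proche
--     x=-1 #on renverra la fiole la plus proche grace a cette variable
--     for e in range(0,len(goalStates)):
--         xFiole = goalStates[e][0]
--         yFiole = goalStates[e][1]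
--         front = []
--         res = []
--         res.append(Node(xPlayer,yPlayer,0,manhattan(xPlayer,yPlayer,xFiole,yFiole)))
--         for i in ajouteFront(res[0],wallStates,xFiole,yFiole):
--             front.append(i)
--         test = True
--         while front != []:
--             noeudMin = minPar(front)
--             res.append(noeudMin)
--             front.remove(noeudMin)
--             for i in ajouteFront(noeudMin,wallStates,xFiole,yFiole):
--                 for j in front:
--                     if test:
--                         if((i.x == j.x) and (i.y == j.y)):
--                             if i.dParcourue < j.dParcourue:
--                                 front.append(i)
--                                 front.remove(j)
--                             test = False
--                 for j in res:
--                     if test: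
--                         if((i.x == j.x) and (i.y == j.y)):
--                             if i.dParcourue < j.dParcourue:
--                                 res.append(i)
--                                 res.remove(j)
--                             test = False
--                 if test:
--                     front.append(i)
--                 test = True
--         for k in res:
--             if k.x == xFiole and k.y == yFiole:
--                 if k.dParcourue < dist: #on test si la fiole qu on vient de tester est plus proche
--                     dist = k.dParcourue #si oui on met a jour la distance de la fiole la plus proche
--                     x = e #on met a jour la fiole la plus proche
--     if x == -1:
--         return 0
--     return x
-- ===== SOURCE B (Python) =====
-- def nearestGoal(posPlayer, wallStates, goalStates):
--     # One BFS from the player over the 20x20 grid computes all shortest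
--     # distances at once; then a single pass picks the first goal of minimal
--     # distance (index order breaks ties, 0 if no goal is reachable).
--     walls = set(wallStates)
--     start = (posPlayer[0], posPlayer[1])
--     dist = {start: 0}
--     queue = [start]
--     head = 0
--     while head < len(queue):
--         (x, y) = queue[head]
--         head += 1
--         d = dist[(x, y)] + 1
--         for c in ((x + 1, y), (x - 1, y), (x, y + 1), (x, y - 1)):
--             if 0 <= c[0] <= 19 and 0 <= c[1] <= 19 and c not in walls and c not in dist:
--                 dist[c] = d
--                 queue.append(c)
--     best = 0
--     besti = -1
--     for i, g in enumerate(goalStates):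
--         d = dist.get(g)
--         if d is not None and (besti == -1 or d < best):
--             best = d
--             besti = i
--     return 0 if besti == -1 else besti
-- ===== Notes on version B (the rewrite author's own statement) =====
-- stated objective: faster
-- what changed: A runs one list-based Dijkstra-style search per goal (linear-scan min-extraction and linear frontier/visited scans, the goal only changes a dead heuristic field); B runs a single FIFO BFS from the player with a distance dict and then one pass over the goals picking the first index of minimal distance.
import Mathlib
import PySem

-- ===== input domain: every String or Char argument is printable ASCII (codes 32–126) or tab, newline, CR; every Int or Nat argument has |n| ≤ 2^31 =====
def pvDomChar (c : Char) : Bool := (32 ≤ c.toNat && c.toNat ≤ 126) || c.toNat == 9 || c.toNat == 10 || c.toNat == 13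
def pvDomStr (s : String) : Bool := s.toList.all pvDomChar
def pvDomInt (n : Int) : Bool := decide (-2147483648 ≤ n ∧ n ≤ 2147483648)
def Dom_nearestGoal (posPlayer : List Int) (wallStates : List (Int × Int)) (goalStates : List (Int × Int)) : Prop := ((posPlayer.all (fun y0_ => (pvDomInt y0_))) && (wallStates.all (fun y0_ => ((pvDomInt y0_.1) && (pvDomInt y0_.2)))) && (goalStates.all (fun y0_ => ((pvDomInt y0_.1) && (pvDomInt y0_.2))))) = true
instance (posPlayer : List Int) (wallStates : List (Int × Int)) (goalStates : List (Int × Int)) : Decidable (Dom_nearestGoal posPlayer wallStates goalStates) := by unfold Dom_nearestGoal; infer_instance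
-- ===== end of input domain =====

-- B replaces A's per-goal list-based Dijkstra searches by one FIFO BFS from the player
-- plus a single pass over the goals (objective: faster).

-- ===== PORT A =====
-- Python Node(x, y, dParcourue, dMan, parent): the parent field is written but never read
-- by nearestGoal, so it is omitted from the record.
structure NodeA where
  x : Int
  y : Int
  dP : Int
  dM : Int
deriving DecidableEq, Repr

def manhattanA (x1 y1 x2 y2 : Int) : Int := |x1 - x2| + |y1 - y2|

def ajouteFrontA (noeud : NodeA) (wallStates : List (Int × Int)) (xFiole yFiole : Int) : List NodeA :=
  (if !(wallStates.contains (noeud.x + 1, noeud.y)) && decide (0 ≤ noeud.x + 1) && decide (0 ≤ noeud.y) && decide (noeud.x + 1 ≤ 19) && decide (noeud.y ≤ 19) then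
      [⟨noeud.x + 1, noeud.y, noeud.dP + 1, manhattanA (noeud.x + 1) noeud.y xFiole yFiole⟩] else [])
  ++ (if !(wallStates.contains (noeud.x - 1, noeud.y)) && decide (0 ≤ noeud.x - 1) && decide (0 ≤ noeud.y) && decide (noeud.x - 1 ≤ 19) && decide (noeud.y ≤ 19) then
      [⟨noeud.x - 1, noeud.y, noeud.dP + 1, manhattanA (noeud.x - 1) noeud.y xFiole yFiole⟩] else [])
  ++ (if !(wallStates.contains (noeud.x, noeud.y + 1)) && decide (0 ≤ noeud.x) && decide (0 ≤ noeud.y + 1) && decide (noeud.x ≤ 19) && decide (noeud.y + 1 ≤ 19) then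
      [⟨noeud.x, noeud.y + 1, noeud.dP + 1, manhattanA noeud.x (noeud.y + 1) xFiole yFiole⟩] else [])
  ++ (if !(wallStates.contains (noeud.x, noeud.y - 1)) && decide (0 ≤ noeud.x) && decide (0 ≤ noeud.y - 1) && decide (noeud.x ≤ 19) && decide (noeud.y - 1 ≤ 19) then
      [⟨noeud.x, noeud.y - 1, noeud.dP + 1, manhattanA noeud.x (noeud.y - 1) xFiole yFiole⟩] else [])

-- minPar scans the whole list keeping the first strictly-smaller element
def minParA (h : NodeA) (t : List NodeA) : NodeA :=
  (((h :: t).foldl (fun (p : Int × NodeA) i => if i.dP < p.1 then (i.dP, i) else p) (h.dP, h))).2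

-- The Python 'test' flag lets each of the two inner scans act on at most the FIRST cell
-- match, and the list mutation happens only after the flag clears, so each scan is a
-- first-match search (find?) over the list as it stood; front.remove(j) is erase.
def processA (st : List NodeA × List NodeA) (i : NodeA) : List NodeA × List NodeA :=
  match st.1.find? (fun j => i.x == j.x && i.y == j.y) with
  | some j => if i.dP < j.dP then ((st.1 ++ [i]).erase j, st.2) else st
  | none =>
    match st.2.find? (fun j => i.x == j.x && i.y == j.y) with
    | some j => if i.dP < j.dP then (st.1, (st.2 ++ [i]).erase j) else st
    | none => (st.1 ++ [i], st.2)

-- the 'while front != []' loop; fuel only makes it total (the proof shows at most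
-- 401 iterations ever run, so fuel 1000 is never exhausted on any input)
def loopA (wallStates : List (Int × Int)) (xFiole yFiole : Int) : Nat → List NodeA → List NodeA → List NodeA
  | 0, _, res => res
  | _ + 1, [], res => res
  | fuel + 1, f :: fs, res =>
    let noeudMin := minParA f fs
    let st := (ajouteFrontA noeudMin wallStates xFiole yFiole).foldl processA
      ((f :: fs).erase noeudMin, res ++ [noeudMin])
    loopA wallStates xFiole yFiole fuel st.1 st.2

def nearestGoal (posPlayer : List Int) (wallStates : List (Int × Int)) (goalStates : List (Int × Int)) : Int :=
  match posPlayer with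
  | xPlayer :: yPlayer :: _ =>
    let st :=
      (PySem.List.pyRange 0 (PySem.List.len goalStates) 1).foldl
        (fun (st : Int × Int) e =>
          let g := PySem.List.pyGetD goalStates e (0, 0)  -- goalStates[e]: e is always in range
          let res0 : NodeA := ⟨xPlayer, yPlayer, 0, manhattanA xPlayer yPlayer g.1 g.2⟩
          let front := (ajouteFrontA res0 wallStates g.1 g.2).foldl (fun l i => l ++ [i]) []
          let res := loopA wallStates g.1 g.2 1000 front [res0]
          res.foldl (fun (st2 : Int × Int) k =>
            if k.x == g.1 && k.y == g.2 then
              if k.dP < st2.1 then (k.dP, e) else st2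
            else st2) st)
        (10000, -1)
    if st.2 == -1 then 0 else st.2
  | _ => 0  -- posPlayer[0] / posPlayer[1] raises IndexError there; excluded by Pre_

-- ===== PORT B =====
def neighborsB (x y : Int) : List (Int × Int) := [(x + 1, y), (x - 1, y), (x, y + 1), (x, y - 1)]

-- body of B's inner 'for c in (...)' loop
def bStepB (walls : PySem.Set (Int × Int)) (d : Int)
    (st : PySem.Dict (Int × Int) Int × List (Int × Int)) (c : Int × Int) :
    PySem.Dict (Int × Int) Int × List (Int × Int) :=
  if decide (0 ≤ c.1) && decide (c.1 ≤ 19) && decide (0 ≤ c.2) && decide (c.2 ≤ 19)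
      && !(PySem.Set.contains walls c) && !(st.1.contains c)
  then (st.1.insert c d, st.2 ++ [c]) else st

-- B's 'while head < len(queue)' BFS loop (the not-yet-dequeued queue suffix is the list
-- argument); fuel only makes it total and is never exhausted (proof: ≤ 401 dequeues)
def bfsB (walls : PySem.Set (Int × Int)) : Nat → PySem.Dict (Int × Int) Int → List (Int × Int) → PySem.Dict (Int × Int) Int
  | 0, dist, _ => dist
  | _ + 1, dist, [] => dist
  | fuel + 1, dist, c :: rest =>
    let d := dist.getD c 0 + 1  -- dist[(x, y)]: a dequeued key is always present
    let st := (neighborsB c.1 c.2).foldl (bStepB walls d) (dist, [])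
    bfsB walls fuel st.1 (rest ++ st.2)

def nearestGoal_alt (posPlayer : List Int) (wallStates : List (Int × Int)) (goalStates : List (Int × Int)) : Int :=
  let walls := PySem.Set.ofList wallStates
  -- start = (posPlayer[0], posPlayer[1]); both indices are in range under Pre_
  let start := (PySem.List.pyGetD posPlayer 0 0, PySem.List.pyGetD posPlayer 1 0)
  let dist := bfsB walls 1001 ((PySem.Dict.empty).insert start 0) [start]
  let bb :=
    (PySem.List.enumerate goalStates 0).foldl
      (fun (bb : Int × Int) ig =>
        match dist.get? ig.2 with
        | some d => if bb.2 == -1 || d < bb.1 then (d, ig.1) else bb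
        | none => bb)
      (0, -1)
  if bb.2 == -1 then 0 else bb.2

-- ===== PRECONDITION & SPEC =====
-- Python A reads posPlayer[0] and posPlayer[1]: on a shorter list it raises IndexError.
def Pre_nearestGoal (posPlayer : List Int) (wallStates : List (Int × Int)) (goalStates : List (Int × Int)) : Prop :=
  2 ≤ posPlayer.length
instance (posPlayer : List Int) (wallStates : List (Int × Int)) (goalStates : List (Int × Int)) : Decidable (Pre_nearestGoal posPlayer wallStates goalStates) := by unfold Pre_nearestGoal; infer_instance

def pvWitness_nearestGoal : List Int × (List (Int × Int)) × (List (Int × Int)) :=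
  ([1, 1], [(3, 1)], [(0, 0), (5, 1)])

def Spec_nearestGoal (posPlayer : List Int) (wallStates : List (Int × Int)) (goalStates : List (Int × Int)) (out : Int) : Prop := out = nearestGoal_alt posPlayer wallStates goalStates
instance (posPlayer : List Int) (wallStates : List (Int × Int)) (goalStates : List (Int × Int)) (out : Int) : Decidable (Spec_nearestGoal posPlayer wallStates goalStates out) := by unfold Spec_nearestGoal; infer_instance

-- ===== CLAIM (what is proved, stated in full; the proofs are below) =====
def Claim_equal_nearestGoal : Prop := ∀ (posPlayer : List Int) (wallStates : List (Int × Int)) (goalStates : List (Int × Int)), Dom_nearestGoal posPlayer wallStates goalStates → Pre_nearestGoal posPlayer wallStates goalStates → Spec_nearestGoal posPlayer wallStates goalStates (nearestGoal posPlayer wallStates goalStates)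

-- ===== LEMMAS AND PROOFS =====

def cellN (n : NodeA) : Int × Int := (n.x, n.y)

def okA (walls : List (Int × Int)) (c : Int × Int) : Bool :=
  !(walls.contains c) && decide (0 ≤ c.1) && decide (0 ≤ c.2) && decide (c.1 ≤ 19) && decide (c.2 ≤ 19)

def mkN (dcur xF yF : Int) (c : Int × Int) : NodeA := ⟨c.1, c.2, dcur, manhattanA c.1 c.2 xF yF⟩

def findCell (l : List NodeA) (c : Int × Int) : Option NodeA :=
  l.find? (fun j => c.1 == j.x && c.2 == j.y)

lemma ajouteFront_eq (n : NodeA) (walls : List (Int × Int)) (xF yF : Int) :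
    ajouteFrontA n walls xF yF
      = ((neighborsB n.x n.y).filter (okA walls)).map (mkN (n.dP + 1) xF yF) := by
  have hch : ∀ (c : Int × Int) (l : List (Int × Int)),
      ((c :: l).filter (okA walls)).map (mkN (n.dP + 1) xF yF)
        = (if okA walls c then [mkN (n.dP + 1) xF yF c] else [])
          ++ (l.filter (okA walls)).map (mkN (n.dP + 1) xF yF) := by
    intro c l; by_cases h : okA walls c <;> simp [h]
  rw [neighborsB, hch, hch, hch, hch]
  simp only [List.filter_nil, List.map_nil, List.append_nil, ← List.append_assoc]
  rfl

lemma minParA_head (f : NodeA) (fs : List NodeA) (h : ∀ j ∈ fs, f.dP ≤ j.dP) :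
    minParA f fs = f := by
  have key : ∀ (l : List NodeA) (p : Int × NodeA), (∀ j ∈ l, p.1 ≤ j.dP) →
      l.foldl (fun (p : Int × NodeA) i => if i.dP < p.1 then (i.dP, i) else p) p = p := by
    intro l
    induction l with
    | nil => intro p _; rfl
    | cons a t ih =>
      intro p hp
      simp only [List.foldl_cons]
      rw [if_neg (by have := hp a (by simp); omega)]
      exact ih p (fun j hj => hp j (by simp [hj]))
  unfold minParA
  rw [List.foldl_cons, if_neg (by omega), key fs (f.dP, f) h]

lemma findCell_append (l1 l2 : List NodeA) (c : Int × Int) :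
    findCell (l1 ++ l2) c = (findCell l1 c).or (findCell l2 c) := by
  simp [findCell, List.find?_append]

lemma findCell_eq_none (l : List NodeA) (c : Int × Int) (h : ∀ n ∈ l, cellN n ≠ c) :
    findCell l c = none := by
  simp only [findCell, List.find?_eq_none]
  intro n hn
  have hc := h n hn
  simp only [Bool.and_eq_true, beq_iff_eq, not_and]
  intro h1 h2
  exact hc (Prod.ext_iff.mpr ⟨h1.symm, h2.symm⟩)

lemma findCell_mem {l : List NodeA} {c : Int × Int} {n : NodeA} (h : findCell l c = some n) :
    n ∈ l ∧ cellN n = c := by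
  refine ⟨List.mem_of_find?_eq_some h, ?_⟩
  have := List.find?_some h
  simp only [Bool.and_eq_true, beq_iff_eq] at this
  exact Prod.ext_iff.mpr ⟨this.1.symm, this.2.symm⟩

lemma findCell_of_nodup_mem {l : List NodeA} {f : NodeA} (hnd : (l.map cellN).Nodup)
    (hm : f ∈ l) : findCell l (cellN f) = some f := by
  induction l with
  | nil => simp at hm
  | cons a t ih =>
    simp only [List.map_cons, List.nodup_cons] at hnd
    rcases List.mem_cons.1 hm with rfl | hm2
    · simp [findCell, cellN]
    · have hne : cellN a ≠ cellN f := fun h => hnd.1 (h ▸ List.mem_map_of_mem hm2)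
      have hpa : ¬(((cellN f).1 == a.x && (cellN f).2 == a.y) = true) := by
        simp only [cellN, Bool.and_eq_true, beq_iff_eq, not_and]
        intro h1 h2
        exact hne (Prod.ext_iff.mpr ⟨h1.symm, h2.symm⟩)
      unfold findCell at ih ⊢
      rw [List.find?_cons_of_neg (p := fun (j : NodeA) => (cellN f).1 == j.x && (cellN f).2 == j.y) hpa]
      exact ih hnd.2 hm2

def inGridB (c : Int × Int) : Bool := decide (0 ≤ c.1) && decide (c.1 ≤ 19) && decide (0 ≤ c.2) && decide (c.2 ≤ 19)

def codeC (start : Int × Int) (c : Int × Int) : Nat :=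
  if c = start then 400 else c.1.toNat * 20 + c.2.toNat

lemma card_cells (start : Int × Int) (l : List (Int × Int)) (hnd : l.Nodup)
    (h : ∀ c ∈ l, c = start ∨ inGridB c) : l.length ≤ 401 := by
  have hgrid : ∀ c ∈ l, c ≠ start → c.1.toNat ≤ 19 ∧ c.2.toNat ≤ 19 := by
    intro c hc hne
    rcases h c hc with rfl | hg
    · exact absurd rfl hne
    · simp only [inGridB, Bool.and_eq_true, decide_eq_true_eq] at hg
      omega
  have hinj : ∀ c ∈ l, ∀ c' ∈ l, codeC start c = codeC start c' → c = c' := by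
    intro c hc c' hc' hcode
    by_cases h1 : c = start <;> by_cases h2 : c' = start
    · rw [h1, h2]
    · exfalso; have := hgrid c' hc' h2
      simp only [codeC, if_pos h1, if_neg h2] at hcode; omega
    · exfalso; have := hgrid c hc h1
      simp only [codeC, if_neg h1, if_pos h2] at hcode; omega
    · have g1 := hgrid c hc h1; have g2 := hgrid c' hc' h2
      simp only [codeC, if_neg h1, if_neg h2] at hcode
      rcases h c hc with rfl | hg1; · exact absurd rfl h1
      rcases h c' hc' with rfl | hg2; · exact absurd rfl h2
      simp only [inGridB, Bool.and_eq_true, decide_eq_true_eq] at hg1 hg2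
      have e1 : c.1.toNat = c'.1.toNat ∧ c.2.toNat = c'.2.toNat := by omega
      have : c.1 = c'.1 ∧ c.2 = c'.2 := by omega
      exact Prod.ext_iff.mpr this
  have hndm : (l.map (codeC start)).Nodup := hnd.map_on hinj
  have hlt : ∀ x ∈ l.map (codeC start), x < 401 := by
    intro x hx
    rcases List.mem_map.1 hx with ⟨c, hc, rfl⟩
    by_cases h1 : c = start
    · simp [codeC, h1]
    · have := hgrid c hc h1
      simp only [codeC, if_neg h1]; omega
  have hsub : (l.map (codeC start)).toFinset ⊆ Finset.range 401 := by
    intro x hx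
    simp only [Finset.mem_range]
    exact hlt x (List.mem_toFinset.1 hx)
  have := Finset.card_le_card hsub
  rw [List.toFinset_card_of_nodup hndm, Finset.card_range] at this
  simpa using this

lemma findCell_processA (i : NodeA) (l : List NodeA) :
    l.find? (fun j => i.x == j.x && i.y == j.y) = findCell l (cellN i) := rfl

lemma fold_processA_fresh :
    ∀ (nodes fr res1 : List NodeA),
      (∀ i ∈ nodes, findCell (res1 ++ fr) (cellN i) = none) →
      ((nodes.map cellN).Nodup) →
      nodes.foldl processA (fr, res1) = (fr ++ nodes, res1) := by
  intro nodes
  induction nodes with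
  | nil => intro fr res1 _ _; simp
  | cons i rest ih =>
    intro fr res1 hfresh hnd
    have hnone := hfresh i (by simp)
    rw [findCell_append] at hnone
    have h1 : findCell fr (cellN i) = none := by
      cases hr : findCell res1 (cellN i) <;> cases hf : findCell fr (cellN i) <;>
        simp [hr, hf] at hnone ⊢
    have h2 : findCell res1 (cellN i) = none := by
      cases hr : findCell res1 (cellN i) <;> cases hf : findCell fr (cellN i) <;>
        simp [hr, hf] at hnone ⊢
    simp only [List.map_cons, List.nodup_cons] at hnd
    have hstep : processA (fr, res1) i = (fr ++ [i], res1) := by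
      simp [processA, findCell_processA, h1, h2]
    rw [List.foldl_cons, hstep, ih (fr ++ [i]) res1 ?_ hnd.2]
    · simp
    · intro j hj
      have hold := hfresh j (by simp [hj])
      rw [findCell_append] at hold ⊢
      rw [findCell_append]
      have hji : cellN j ≠ cellN i := fun h => hnd.1 (h ▸ List.mem_map_of_mem hj)
      have : findCell [i] (cellN j) = none := findCell_eq_none _ _ (by simpa using fun h => (hji h.symm).elim)
      cases hr : findCell res1 (cellN j) <;> cases hf : findCell fr (cellN j) <;>
        simp_all [hr, hf]

lemma scan_nomatch (g : Int × Int) (e : Int) :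
    ∀ (res : List NodeA) (st : Int × Int), findCell res g = none →
      res.foldl (fun (st2 : Int × Int) k =>
          if k.x == g.1 && k.y == g.2 then
            if k.dP < st2.1 then (k.dP, e) else st2
          else st2) st = st := by
  intro res
  induction res with
  | nil => intro st _; rfl
  | cons k rest ih =>
    intro st hnone
    simp only [findCell, List.find?_eq_none, List.mem_cons] at hnone
    have hk := hnone k (Or.inl rfl)
    simp only [Bool.and_eq_true, beq_iff_eq, not_and] at hk
    have hcond : (k.x == g.1 && k.y == g.2) = false := by
      by_cases h1 : k.x = g.1 <;> by_cases h2 : k.y = g.2 <;> simp_all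
    rw [List.foldl_cons, hcond]
    simp only [Bool.false_eq_true, if_false]
    exact ih st (by
      simp only [findCell, List.find?_eq_none]
      exact fun n hn => hnone n (Or.inr hn))

lemma scan_res (g : Int × Int) (e : Int) :
    ∀ (res : List NodeA) (st : Int × Int), (res.map cellN).Nodup →
      res.foldl (fun (st2 : Int × Int) k =>
          if k.x == g.1 && k.y == g.2 then
            if k.dP < st2.1 then (k.dP, e) else st2
          else st2) st
        = match findCell res g with
          | some k => if k.dP < st.1 then (k.dP, e) else st
          | none => st := by
  intro res
  induction res with
  | nil => intro st _; rfl
  | cons k rest ih =>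
    intro st hnd
    simp only [List.map_cons, List.nodup_cons] at hnd
    by_cases hmatch : cellN k = g
    · have hcond : (k.x == g.1 && k.y == g.2) = true := by
        simp only [cellN, Prod.ext_iff] at hmatch
        simp [hmatch.1, hmatch.2]
      have hfind : findCell (k :: rest) g = some k := by
        unfold findCell
        rw [List.find?_cons_of_pos]
        simp only [cellN, Prod.ext_iff] at hmatch
        simp [hmatch.1, hmatch.2]
      have hrest : findCell rest g = none := by
        apply findCell_eq_none
        intro n hn h
        exact hnd.1 ((h.trans hmatch.symm) ▸ List.mem_map_of_mem hn)
      rw [List.foldl_cons, hcond, hfind]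
      simp only [if_true]
      exact scan_nomatch g e rest _ hrest
    · have hcond : (k.x == g.1 && k.y == g.2) = false := by
        simp only [cellN, Prod.ext_iff, not_and] at hmatch
        by_cases h1 : k.x = g.1 <;> by_cases h2 : k.y = g.2 <;> simp_all
      have hfind : findCell (k :: rest) g = findCell rest g := by
        unfold findCell
        rw [List.find?_cons_of_neg]
        simp only [Bool.and_eq_true, beq_iff_eq, not_and]
        intro h1 h2
        exact hmatch (Prod.ext_iff.mpr ⟨h1.symm, h2.symm⟩)
      rw [List.foldl_cons, hcond, hfind]
      simp only [Bool.false_eq_true, if_false]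
      exact ih st hnd.2

def CorrD (l : List NodeA) (dist : PySem.Dict (Int × Int) Int) : Prop :=
  ∀ c, dist.get? c = (findCell l c).map (·.dP)

lemma findCell_eq_none_iff (l : List NodeA) (c : Int × Int) :
    findCell l c = none ↔ ∀ n ∈ l, cellN n ≠ c := by
  constructor
  · intro h n hn hc
    simp only [findCell, List.find?_eq_none] at h
    have := h n hn
    simp only [cellN, Prod.ext_iff] at hc
    simp [hc.1, hc.2] at this
  · exact findCell_eq_none l c

lemma findCell_singleton_self (i : NodeA) : findCell [i] (cellN i) = some i := by
  simp [findCell, cellN]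

lemma findCell_singleton_ne (i : NodeA) (c : Int × Int) (h : c ≠ cellN i) :
    findCell [i] c = none := by
  apply findCell_eq_none
  intro n hn
  simp only [List.mem_singleton] at hn
  subst hn
  exact fun hc => h hc.symm

lemma nodup_snoc_cell (l : List NodeA) (i : NodeA) (h : (l.map cellN).Nodup)
    (hfresh : findCell l (cellN i) = none) : ((l ++ [i]).map cellN).Nodup := by
  rw [List.map_append, List.nodup_append]
  refine ⟨h, by simp, ?_⟩
  intro a ha b hb
  simp only [List.map_singleton, List.mem_singleton] at hb
  subst hb
  rcases List.mem_map.1 ha with ⟨n, hn, rfl⟩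
  exact (findCell_eq_none_iff l (cellN i)).1 hfresh n hn

lemma corr_snoc (l : List NodeA) (dz : PySem.Dict (Int × Int) Int) (i : NodeA)
    (hc : CorrD l dz) (hfresh : findCell l (cellN i) = none) :
    CorrD (l ++ [i]) (dz.insert (cellN i) i.dP) := by
  intro c
  rw [findCell_append, PySem.Dict.get?_insert]
  by_cases hceq : c = cellN i
  · subst hceq
    rw [if_pos rfl, hfresh, findCell_singleton_self]
    rfl
  · rw [if_neg hceq, findCell_singleton_ne i c hceq, hc c]
    cases h : findCell l c <;> simp [h]

lemma inner_sim (walls : List (Int × Int)) (xF yF dcur : Int) (res1 : List NodeA)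
    (hres1 : ∀ k ∈ res1, k.dP ≤ dcur) :
    ∀ (cs : List (Int × Int)) (fs ex : List NodeA) (dz : PySem.Dict (Int × Int) Int),
      (∀ j ∈ fs, j.dP ≤ dcur) →
      (∀ j ∈ ex, j.dP = dcur) →
      ((res1 ++ (fs ++ ex)).map cellN).Nodup →
      (∀ j ∈ fs ++ ex, inGridB (cellN j) ∧ cellN j ∉ walls) →
      CorrD (res1 ++ (fs ++ ex)) dz →
      ∃ ex' dz',
        cs.foldl (bStepB (PySem.Set.ofList walls) dcur) (dz, ex.map cellN) = (dz', (ex ++ ex').map cellN) ∧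
        ((cs.filter (okA walls)).map (mkN dcur xF yF)).foldl processA (fs ++ ex, res1) = (fs ++ (ex ++ ex'), res1) ∧
        (∀ j ∈ ex', j.dP = dcur) ∧
        (∀ j ∈ ex', inGridB (cellN j) ∧ cellN j ∉ walls) ∧
        ((res1 ++ (fs ++ (ex ++ ex'))).map cellN).Nodup ∧
        CorrD (res1 ++ (fs ++ (ex ++ ex'))) dz' := by
  intro cs
  induction cs with
  | nil =>
    intro fs ex dz hfs hex hnd hcells hcorr
    exact ⟨[], dz, by simp, by simp, by simp, by simp, by simpa using hnd, by simpa using hcorr⟩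
  | cons c cs ih =>
    intro fs ex dz hfs hex hnd hcells hcorr
    by_cases hok : okA walls c = true
    · have hokp := hok
      simp only [okA, Bool.and_eq_true, Bool.not_eq_true', decide_eq_true_eq] at hokp
      obtain ⟨⟨⟨⟨hw, hb1⟩, hb2⟩, hb3⟩, hb4⟩ := hokp
      have hwmem : c ∉ walls := by
        intro hmem
        rw [List.contains_iff_mem.mpr hmem] at hw
        cases hw
      have hfilter : ((c :: cs).filter (okA walls)) = c :: cs.filter (okA walls) :=
        List.filter_cons_of_pos hok
      have hidP : (mkN dcur xF yF c).dP = dcur := rfl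
      have hicell : cellN (mkN dcur xF yF c) = c := rfl
      by_cases hdzc : dz.contains c = true
      · -- already discovered: both sides skip
        have hBstep : bStepB (PySem.Set.ofList walls) dcur (dz, ex.map cellN) c = (dz, ex.map cellN) := by
          simp only [bStepB]
          rw [if_neg]
          simp [hdzc]
        have hsome : (findCell (res1 ++ (fs ++ ex)) c).isSome = true := by
          rw [PySem.Dict.contains_eq_isSome_get?, hcorr c] at hdzc
          cases h : findCell (res1 ++ (fs ++ ex)) c <;> simp [h] at hdzc ⊢
        have hstep : processA (fs ++ ex, res1) (mkN dcur xF yF c) = (fs ++ ex, res1) := by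
          simp only [processA, findCell_processA, hicell]
          cases hfr : findCell (fs ++ ex) c with
          | some j =>
            have hj := findCell_mem hfr
            have hjd : j.dP ≤ dcur := by
              rcases List.mem_append.1 hj.1 with h | h
              · exact hfs j h
              · exact le_of_eq (hex j h)
            simp only [hidP]
            rw [if_neg (by omega)]
          | none =>
            rw [findCell_append, hfr] at hsome
            cases hres : findCell res1 c with
            | some j =>
              have hj := findCell_mem hres
              have hjd : j.dP ≤ dcur := hres1 j hj.1
              simp only [hres, hidP]
              rw [if_neg (by omega)]
            | none => rw [hres] at hsome; simp at hsome
        obtain ⟨ex', dz', hB, hA, h3, h4, h5, h6⟩ := ih fs ex dz hfs hex hnd hcells hcorr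
        refine ⟨ex', dz', ?_, ?_, h3, h4, h5, h6⟩
        · rw [List.foldl_cons, hBstep, hB]
        · rw [hfilter, List.map_cons, List.foldl_cons, hstep, hA]
      · -- fresh cell: B inserts, A appends
        have hget : dz.get? c = none := by
          rw [PySem.Dict.contains_eq_isSome_get?] at hdzc
          cases h : dz.get? c <;> simp [h] at hdzc ⊢
        have hnone : findCell (res1 ++ (fs ++ ex)) c = none := by
          have := hcorr c
          rw [hget] at this
          cases h : findCell (res1 ++ (fs ++ ex)) c <;> simp [h] at this ⊢
        have hfr_none : findCell (fs ++ ex) c = none := by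
          rw [findCell_append] at hnone
          cases h1 : findCell res1 c <;> cases h2 : findCell (fs ++ ex) c <;>
            simp [h1, h2] at hnone ⊢
        have hres_none : findCell res1 c = none := by
          rw [findCell_append] at hnone
          cases h1 : findCell res1 c <;> cases h2 : findCell (fs ++ ex) c <;>
            simp [h1, h2] at hnone ⊢
        have hdzf : dz.contains c = false := by
          cases h : dz.contains c
          · rfl
          · exact absurd h hdzc
        have hsetf : PySem.Set.contains (PySem.Set.ofList walls) c = false := by
          cases h : PySem.Set.contains (PySem.Set.ofList walls) c
          · rfl
          · exact absurd ((PySem.Set.mem_ofList _ _).mp ((PySem.Set.contains_iff _ _).mp h)) hwmem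
        have hBstep : bStepB (PySem.Set.ofList walls) dcur (dz, ex.map cellN) c
            = (dz.insert c dcur, ex.map cellN ++ [c]) := by
          simp only [bStepB]
          rw [if_pos]
          simp only [Bool.and_eq_true, Bool.not_eq_true', decide_eq_true_eq]
          exact ⟨⟨⟨⟨⟨hb1, hb3⟩, hb2⟩, hb4⟩, hsetf⟩, hdzf⟩
        have hstep : processA (fs ++ ex, res1) (mkN dcur xF yF c)
            = ((fs ++ ex) ++ [mkN dcur xF yF c], res1) := by
          simp only [processA, findCell_processA, hicell, hfr_none, hres_none]
        have hifresh : findCell (res1 ++ (fs ++ ex)) (cellN (mkN dcur xF yF c)) = none := by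
          rw [hicell]; exact hnone
        have hnd2 : ((res1 ++ (fs ++ (ex ++ [mkN dcur xF yF c]))).map cellN).Nodup := by
          have h0 := nodup_snoc_cell (res1 ++ (fs ++ ex)) (mkN dcur xF yF c) hnd hifresh
          have ha : (res1 ++ (fs ++ ex)) ++ [mkN dcur xF yF c]
              = res1 ++ (fs ++ (ex ++ [mkN dcur xF yF c])) := by simp [List.append_assoc]
          rwa [ha] at h0
        have hcorr2 : CorrD (res1 ++ (fs ++ (ex ++ [mkN dcur xF yF c]))) (dz.insert c dcur) := by
          have h0 := corr_snoc (res1 ++ (fs ++ ex)) dz (mkN dcur xF yF c) hcorr hifresh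
          have ha : (res1 ++ (fs ++ ex)) ++ [mkN dcur xF yF c]
              = res1 ++ (fs ++ (ex ++ [mkN dcur xF yF c])) := by simp [List.append_assoc]
          rwa [ha] at h0
        have hcells2 : ∀ j ∈ fs ++ (ex ++ [mkN dcur xF yF c]), inGridB (cellN j) ∧ cellN j ∉ walls := by
          intro j hj
          rcases List.mem_append.1 hj with h | h
          · exact hcells j (List.mem_append.2 (Or.inl h))
          · rcases List.mem_append.1 h with h | h
            · exact hcells j (List.mem_append.2 (Or.inr h))
            · rcases List.mem_singleton.1 h with rfl
              refine ⟨?_, by rw [hicell]; exact hwmem⟩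
              rw [hicell]
              simp only [inGridB, Bool.and_eq_true, decide_eq_true_eq]
              exact ⟨⟨⟨hb1, hb3⟩, hb2⟩, hb4⟩
        have hex2 : ∀ j ∈ ex ++ [mkN dcur xF yF c], j.dP = dcur := by
          intro j hj
          rcases List.mem_append.1 hj with h | h
          · exact hex j h
          · rcases List.mem_singleton.1 h with rfl
            rfl
        obtain ⟨ex2, dz2, hB, hA, h3, h4, h5, h6⟩ :=
          ih fs (ex ++ [mkN dcur xF yF c]) (dz.insert c dcur) hfs hex2 hnd2 hcells2 hcorr2
        have hassoc : (ex ++ [mkN dcur xF yF c]) ++ ex2 = ex ++ (mkN dcur xF yF c :: ex2) := by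
          simp
        refine ⟨mkN dcur xF yF c :: ex2, dz2, ?_, ?_, ?_, ?_, ?_, ?_⟩
        · rw [List.foldl_cons, hBstep]
          have hm : ex.map cellN ++ [c] = (ex ++ [mkN dcur xF yF c]).map cellN := by
            simp [hicell]
          rw [hm, hB, hassoc]
        · rw [hfilter, List.map_cons, List.foldl_cons, hstep]
          have hm : (fs ++ ex) ++ [mkN dcur xF yF c] = fs ++ (ex ++ [mkN dcur xF yF c]) := by
            simp
          rw [hm, hA, hassoc]
        · intro j hj
          rcases List.mem_cons.1 hj with rfl | h
          · rfl
          · exact h3 j h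
        · intro j hj
          rcases List.mem_cons.1 hj with rfl | h
          · refine ⟨?_, by rw [hicell]; exact hwmem⟩
            rw [hicell]
            simp only [inGridB, Bool.and_eq_true, decide_eq_true_eq]
            exact ⟨⟨⟨hb1, hb3⟩, hb2⟩, hb4⟩
          · exact h4 j h
        · rwa [hassoc] at h5
        · rwa [hassoc] at h6
    · -- cell fails A's bounds/wall test: both sides skip it
      have hfilter : ((c :: cs).filter (okA walls)) = cs.filter (okA walls) :=
        List.filter_cons_of_neg (by simpa using hok)
      have hBstep : bStepB (PySem.Set.ofList walls) dcur (dz, ex.map cellN) c = (dz, ex.map cellN) := by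
        simp only [bStepB]
        rw [if_neg]
        intro hcond
        simp only [Bool.and_eq_true, Bool.not_eq_true', decide_eq_true_eq] at hcond
        obtain ⟨⟨⟨⟨⟨k1, k3⟩, k2⟩, k4⟩, kset⟩, _⟩ := hcond
        apply hok
        simp only [okA, Bool.and_eq_true, Bool.not_eq_true', decide_eq_true_eq]
        refine ⟨⟨⟨⟨?_, k1⟩, k2⟩, k3⟩, k4⟩
        cases h : walls.contains c
        · rfl
        · exfalso
          have hc : c ∈ walls := List.contains_iff_mem.mp h
          have : PySem.Set.contains (PySem.Set.ofList walls) c = true :=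
            (PySem.Set.contains_iff _ _).mpr ((PySem.Set.mem_ofList _ _).mpr hc)
          rw [kset] at this
          cases this
      obtain ⟨ex2, dz2, hB, hA, h3, h4, h5, h6⟩ := ih fs ex dz hfs hex hnd hcells hcorr
      refine ⟨ex2, dz2, ?_, ?_, h3, h4, h5, h6⟩
      · rw [List.foldl_cons, hBstep, hB]
      · rw [hfilter, hA]

def InvA (start : Int × Int) (walls : List (Int × Int)) (res front : List NodeA) : Prop :=
  ((res ++ front).map cellN).Nodup ∧
  (∀ k ∈ res, cellN k = start ∨ (inGridB (cellN k) ∧ cellN k ∉ walls)) ∧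
  (∀ j ∈ front, inGridB (cellN j) ∧ cellN j ∉ walls) ∧
  front.Pairwise (fun a b => a.dP ≤ b.dP) ∧
  (∀ f ∈ front.head?, (∀ j ∈ front, j.dP = f.dP ∨ j.dP = f.dP + 1) ∧ (∀ k ∈ res, k.dP ≤ f.dP)) ∧
  (∀ j ∈ front, j.dP ≤ (res.length : Int)) ∧
  (∀ k ∈ res, k.dP ≤ (res.length : Int))

lemma res_length_le {start walls res front} (h : InvA start walls res front) :
    res.length ≤ 401 := by
  obtain ⟨hnd, hres, -, -, -, -, -⟩ := h
  rw [List.map_append] at hnd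
  have hnd' : (res.map cellN).Nodup := hnd.of_append_left
  have hmem : ∀ c ∈ res.map cellN, c = start ∨ inGridB c := by
    intro c hc
    rcases List.mem_map.1 hc with ⟨k, hk, rfl⟩
    exact (hres k hk).imp_right And.left
  have := card_cells start (res.map cellN) hnd' hmem
  simpa using this

lemma pairwise_le_of_const (l : List NodeA) (d : Int) (h : ∀ j ∈ l, j.dP = d) :
    l.Pairwise (fun a b => a.dP ≤ b.dP) := by
  induction l with
  | nil => exact List.Pairwise.nil
  | cons a t ih =>
    refine List.pairwise_cons.2 ⟨?_, ih fun j hj => h j (List.mem_cons_of_mem a hj)⟩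
    intro b hb
    rw [h a (List.mem_cons_self), h b (List.mem_cons_of_mem a hb)]

lemma step_sim (start : Int × Int) (walls : List (Int × Int)) (xF yF : Int)
    (f : NodeA) (fs res : List NodeA) (dist : PySem.Dict (Int × Int) Int)
    (hI : InvA start walls res (f :: fs)) (hC : CorrD (res ++ (f :: fs)) dist) :
    ∃ ex' dz',
      (neighborsB f.x f.y).foldl (bStepB (PySem.Set.ofList walls) (dist.getD (cellN f) 0 + 1)) (dist, []) = (dz', ex'.map cellN) ∧
      (ajouteFrontA f walls xF yF).foldl processA (fs, res ++ [f]) = (fs ++ ex', res ++ [f]) ∧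
      InvA start walls (res ++ [f]) (fs ++ ex') ∧
      CorrD ((res ++ [f]) ++ (fs ++ ex')) dz' := by
  obtain ⟨hnd, hres, hfront, hpw, hchain, hfb, hrb⟩ := hI
  have hch := hchain f rfl
  have hgetf : dist.getD (cellN f) 0 = f.dP := by
    have h1 : findCell (res ++ (f :: fs)) (cellN f) = some f :=
      findCell_of_nodup_mem hnd (by simp)
    rw [PySem.Dict.getD_eq_get?_getD, hC (cellN f), h1]
    rfl
  have hassoc : (res ++ [f]) ++ (fs ++ []) = res ++ (f :: fs) := by simp
  obtain ⟨ex', dz', hB, hA, hexd, hexc, hnd', hcorr'⟩ :=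
    inner_sim walls xF yF (f.dP + 1) (res ++ [f])
      (by
        intro k hk
        rcases List.mem_append.1 hk with h | h
        · have := (hch.2 k h); omega
        · rcases List.mem_singleton.1 h with rfl; omega)
      (neighborsB f.x f.y) fs [] dist
      (by
        intro j hj
        rcases hch.1 j (List.mem_cons_of_mem f hj) with h | h <;> omega)
      (by intro j hj; simp at hj)
      (by rw [hassoc]; exact hnd)
      (by
        intro j hj
        simp only [List.append_nil] at hj
        exact hfront j (List.mem_cons_of_mem f hj))
      (by rw [hassoc]; exact hC)
  simp only [List.append_nil, List.nil_append] at hA hB hexd hexc hnd' hcorr'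
  have hfront_eq : ajouteFrontA f walls xF yF
      = ((neighborsB f.x f.y).filter (okA walls)).map (mkN (f.dP + 1) xF yF) :=
    ajouteFront_eq f walls xF yF
  refine ⟨ex', dz', by rw [hgetf]; exact hB, by rw [hfront_eq]; exact hA, ?_, hcorr'⟩
  -- re-establish the invariant
  have hfd : ∀ j ∈ fs, j.dP = f.dP ∨ j.dP = f.dP + 1 :=
    fun j hj => hch.1 j (List.mem_cons_of_mem f hj)
  have hpwfs : fs.Pairwise (fun a b => a.dP ≤ b.dP) := (List.pairwise_cons.1 hpw).2
  have hflen : f.dP ≤ (res.length : Int) := hfb f List.mem_cons_self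
  refine ⟨hnd', ?_, ?_, ?_, ?_, ?_, ?_⟩
  · intro k hk
    rcases List.mem_append.1 hk with h | h
    · exact hres k h
    · rcases List.mem_singleton.1 h with rfl
      exact Or.inr (hfront _ List.mem_cons_self)
  · intro j hj
    rcases List.mem_append.1 hj with h | h
    · exact hfront j (List.mem_cons_of_mem f h)
    · exact hexc j h
  · rw [List.pairwise_append]
    refine ⟨hpwfs, pairwise_le_of_const ex' (f.dP + 1) hexd, ?_⟩
    intro a ha b hb
    rw [hexd b hb]
    rcases hfd a ha with h | h <;> omega
  · intro f' hf'
    constructor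
    · intro j hj
      rcases List.mem_append.1 hj with hjm | hjm
      · -- j in old tail
        cases fs with
        | nil => simp at hjm
        | cons f0 fs0 =>
          simp only [List.cons_append, List.head?_cons, Option.mem_def, Option.some.injEq] at hf'
          subst hf'
          rcases hfd f0 List.mem_cons_self with hf1 | hf1
          · rcases hfd j hjm with h | h <;> omega
          · -- head has d = f.dP + 1, so everything in fs has that d
            have hle : ∀ b ∈ fs0, f0.dP ≤ b.dP := (List.pairwise_cons.1 hpwfs).1
            rcases List.mem_cons.1 hjm with rfl | hjm'
            · omega
            · have := hle j hjm'
              rcases hfd j (List.mem_cons_of_mem f0 hjm') with h | h <;> omega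
      · -- j is new
        cases fs with
        | nil =>
          simp only [List.nil_append] at hf' ⊢
          cases ex' with
          | nil => simp at hf'
          | cons e0 t0 =>
            simp only [List.head?_cons, Option.mem_def, Option.some.injEq] at hf'
            subst hf'
            rw [hexd j hjm, hexd e0 List.mem_cons_self]
            exact Or.inl rfl
        | cons f0 fs0 =>
          simp only [List.cons_append, List.head?_cons, Option.mem_def, Option.some.injEq] at hf'
          subst hf'
          rcases hfd f0 List.mem_cons_self with hf1 | hf1 <;> rw [hexd j hjm] <;> omega
    · intro k hk
      have hfge : f.dP ≤ f'.dP := by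
        rcases List.mem_append.1 (List.mem_of_mem_head? hf') with hm | hm
        · rcases hfd f' hm with h | h <;> omega
        · rw [hexd f' hm]; omega
      rcases List.mem_append.1 hk with h | h
      · have := hch.2 k h; omega
      · rcases List.mem_singleton.1 h with rfl; omega
  · intro j hj
    simp only [List.length_append, List.length_cons, List.length_nil]
    push_cast
    rcases List.mem_append.1 hj with h | h
    · have := hfb j (List.mem_cons_of_mem f h); omega
    · rw [hexd j h]; omega
  · intro k hk
    simp only [List.length_append, List.length_cons, List.length_nil]
    push_cast
    rcases List.mem_append.1 hk with h | h
    · have := hrb k h; omega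
    · rcases List.mem_singleton.1 h with rfl; omega

lemma sim (start : Int × Int) (walls : List (Int × Int)) (xF yF : Int) :
    ∀ (fuel : Nat) (res front : List NodeA) (dist : PySem.Dict (Int × Int) Int),
      InvA start walls res front →
      CorrD (res ++ front) dist →
      402 ≤ res.length + fuel →
      InvA start walls (loopA walls xF yF fuel front res) [] ∧
      CorrD (loopA walls xF yF fuel front res)
        (bfsB (PySem.Set.ofList walls) fuel dist (front.map cellN)) := by
  intro fuel
  induction fuel with
  | zero =>
    intro res front dist hI hC hlen
    cases front with
    | nil =>
      refine ⟨hI, ?_⟩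
      simpa using hC
    | cons f fs =>
      exfalso
      have := res_length_le hI
      omega
  | succ fuel ih =>
    intro res front dist hI hC hlen
    cases front with
    | nil =>
      refine ⟨hI, ?_⟩
      simpa using hC
    | cons f fs =>
      have hch := hI.2.2.2.2.1 f rfl
      have hmin : minParA f fs = f := by
        apply minParA_head
        intro j hj
        rcases hch.1 j (List.mem_cons_of_mem f hj) with h | h <;> omega
      obtain ⟨ex', dz', hB, hA, hI', hC'⟩ := step_sim start walls xF yF f fs res dist hI hC
      have hstepA : loopA walls xF yF (fuel + 1) (f :: fs) res
          = loopA walls xF yF fuel (fs ++ ex') (res ++ [f]) := by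
        conv_lhs => rw [loopA]
        rw [hmin, List.erase_cons_head, hA]
      have hstepB : bfsB (PySem.Set.ofList walls) (fuel + 1) dist ((f :: fs).map cellN)
          = bfsB (PySem.Set.ofList walls) fuel dz' ((fs ++ ex').map cellN) := by
        rw [List.map_cons]
        conv_lhs => rw [bfsB]
        simp only [cellN]
        rw [show ((f.x, f.y) : Int × Int) = cellN f from rfl]
        rw [hB]
        simp [cellN]
      rw [hstepA, hstepB]
      apply ih (res ++ [f]) (fs ++ ex') dz' hI' hC'
      simp only [List.length_append, List.length_cons, List.length_nil]
      omega

lemma per_goal (xP yP : Int) (walls : List (Int × Int)) (xF yF : Int) :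
    ∃ res,
      loopA walls xF yF 1000
        ((ajouteFrontA ⟨xP, yP, 0, manhattanA xP yP xF yF⟩ walls xF yF).foldl (fun l i => l ++ [i]) [])
        [⟨xP, yP, 0, manhattanA xP yP xF yF⟩] = res ∧
      (res.map cellN).Nodup ∧ (∀ k ∈ res, k.dP < 10000) ∧
      CorrD res (bfsB (PySem.Set.ofList walls) 1001
        ((PySem.Dict.empty).insert (xP, yP) 0) [(xP, yP)]) := by
  set start0 : NodeA := ⟨xP, yP, 0, manhattanA xP yP xF yF⟩ with hstart0
  have hcell0 : cellN start0 = (xP, yP) := rfl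
  set dist0 : PySem.Dict (Int × Int) Int := (PySem.Dict.empty).insert (xP, yP) 0 with hdist0
  have hcorr0 : CorrD [start0] dist0 := by
    intro c
    rw [hdist0, PySem.Dict.get?_insert]
    by_cases hc : c = (xP, yP)
    · rw [if_pos hc, hc, ← hcell0, findCell_singleton_self]
      rfl
    · rw [if_neg hc, PySem.Dict.get?_empty, findCell_singleton_ne]
      · rfl
      · rw [hcell0]; exact hc
  -- the four neighbour cells of the start, all distinct and distinct from the start
  have hnbr_ne : ∀ c ∈ neighborsB xP yP, c ≠ (xP, yP) := by
    intro c hc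
    simp only [neighborsB, List.mem_cons, List.mem_singleton] at hc
    rcases hc with rfl | rfl | rfl | (rfl | h)
    all_goals first
      | (intro h; rw [Prod.ext_iff] at h; simp at h; omega)
      | simp_all
  have hnbr_nd : (neighborsB xP yP).Nodup := by
    rw [show neighborsB xP yP = [(xP+1,yP),(xP-1,yP),(xP,yP+1),(xP,yP-1)] from rfl]
    refine List.Pairwise.cons ?_ (List.Pairwise.cons ?_ (List.Pairwise.cons ?_ (List.pairwise_singleton _ _))) <;>
      (intro b hb; fin_cases hb <;> (intro he; rw [Prod.mk.injEq] at he; omega))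
  obtain ⟨ex', dz', hB, hA, hexd, hexc, hnd', hcorr'⟩ :=
    inner_sim walls xF yF 1 [start0]
      (by intro k hk; rcases List.mem_singleton.1 hk with rfl; norm_num)
      (neighborsB xP yP) [] [] dist0
      (by intro j hj; simp at hj)
      (by intro j hj; simp at hj)
      (by simp)
      (by intro j hj; simp at hj)
      (by simpa using hcorr0)
  simp only [List.nil_append, List.append_nil, List.map_nil] at hA hB hexd hexc hnd' hcorr'
  -- A's initial frontier is exactly ex'
  set nodes := ((neighborsB xP yP).filter (okA walls)).map (mkN 1 xF yF) with hnodes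
  have hnodes_cells : nodes.map cellN = (neighborsB xP yP).filter (okA walls) := by
    rw [hnodes, List.map_map]
    have : cellN ∘ mkN 1 xF yF = id := funext fun c => rfl
    rw [this, List.map_id]
  have hfresh : ∀ i ∈ nodes, findCell ([start0] ++ []) (cellN i) = none := by
    intro i hi
    have hci : cellN i ∈ (neighborsB xP yP).filter (okA walls) := by
      rw [← hnodes_cells]; exact List.mem_map_of_mem hi
    have := hnbr_ne (cellN i) (List.mem_of_mem_filter hci)
    simp only [List.append_nil]
    apply findCell_singleton_ne
    rw [hcell0]
    exact this
  have hfold : nodes.foldl processA ([], [start0]) = ([] ++ nodes, [start0]) :=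
    fold_processA_fresh nodes [] [start0] hfresh
      (by rw [hnodes_cells]; exact hnbr_nd.filter _)
  have hexeq : ex' = nodes := by
    have h2 := hA.symm.trans hfold
    simp only [List.nil_append, Prod.mk.injEq] at h2
    exact h2.1
  -- A's port initial frontier
  have hfront0 : (ajouteFrontA start0 walls xF yF).foldl (fun l i => l ++ [i]) [] = ex' := by
    rw [PySem.List.foldl_append_singleton, List.nil_append, hexeq, hnodes]
    have := ajouteFront_eq start0 walls xF yF
    simpa using this
  -- invariant for the initial state
  have hI0 : InvA (xP, yP) walls [start0] ex' := by
    refine ⟨by simpa using hnd', ?_, hexc, pairwise_le_of_const ex' 1 hexd, ?_, ?_, ?_⟩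
    · intro k hk
      rcases List.mem_singleton.1 hk with rfl
      exact Or.inl rfl
    · intro f hf
      have hfd := hexd f (List.mem_of_mem_head? hf)
      constructor
      · intro j hj
        rw [hexd j hj, hfd]
        exact Or.inl rfl
      · intro k hk
        rcases List.mem_singleton.1 hk with rfl
        rw [hfd]
        norm_num [hstart0]
    · intro j hj
      rw [hexd j hj]
      norm_num
    · intro k hk
      rcases List.mem_singleton.1 hk with rfl
      norm_num [hstart0]
  obtain ⟨hIfin, hCfin⟩ := sim (xP, yP) walls xF yF 1000 [start0] ex' dz' hI0
    (by simpa using hcorr') (by simp)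
  refine ⟨_, rfl, ?_, ?_, ?_⟩
  · rw [hfront0]
    have := hIfin.1
    simpa using this
  · intro k hk
    rw [hfront0] at hk
    have hle := hIfin.2.2.2.2.2.2 k hk
    have hbound : (loopA walls xF yF 1000 ex' [start0]).length ≤ 401 := res_length_le hIfin
    have : ((loopA walls xF yF 1000 ex' [start0]).length : Int) ≤ 401 := by exact_mod_cast hbound
    omega
  · rw [hfront0]
    -- B's loop: unfold the first of the 1001 steps
    have hunfold : bfsB (PySem.Set.ofList walls) 1001 dist0 [(xP, yP)]
        = bfsB (PySem.Set.ofList walls) 1000 dz' (ex'.map cellN) := by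
      conv_lhs => rw [show (1001 : Nat) = 1000 + 1 from rfl, bfsB]
      have hd : dist0.getD (xP, yP) 0 + 1 = 1 := by
        rw [hdist0, PySem.Dict.getD_insert_self]
        decide
      rw [hd, hB]
      simp
    rw [hunfold]
    have := hCfin
    simpa using this

lemma foldl_rel {A B C : Type} (R : A → B → Prop) (f : A → C → A) (g : B → C → B) :
    ∀ (l : List C), (∀ x ∈ l, ∀ a b, R a b → R (f a x) (g b x)) →
      ∀ a b, R a b → R (l.foldl f a) (l.foldl g b) := by
  intro l
  induction l with
  | nil => intro _ a b h; exact h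
  | cons x t ih =>
    intro hstep a b h
    exact ih (fun y hy => hstep y (List.mem_cons_of_mem x hy)) _ _ (hstep x List.mem_cons_self a b h)

theorem nearestGoal_spec : Claim_equal_nearestGoal := by
  intro posPlayer walls gs _hdom hpre
  unfold Spec_nearestGoal
  match posPlayer with
  | [] => exact absurd hpre (by simp [Pre_nearestGoal])
  | [_] => exact absurd hpre (by simp [Pre_nearestGoal])
  | xP :: yP :: rest =>
    have h0 : PySem.List.pyGetD (xP :: yP :: rest) 0 (0 : Int) = xP := PySem.List.pyGetD_zero_cons _ _ _
    have h1 : PySem.List.pyGetD (xP :: yP :: rest) 1 (0 : Int) = yP := by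
      simp [pysem]
    simp only [nearestGoal, nearestGoal_alt, h0, h1]
    rw [PySem.List.enumerate_eq_map_pyRange gs ((0 : Int), (0 : Int)), List.foldl_map]
    have key : ∀ (a b : Int × Int),
        (a.2 = b.2 ∧ ((a.2 = -1 ∧ a.1 = 10000) ∨ (a.2 ≠ -1 ∧ a.1 = b.1 ∧ a.1 < 10000))) →
        ((if a.2 == -1 then (0 : Int) else a.2) = if b.2 == -1 then (0 : Int) else b.2) := by
      intro a b h
      rw [h.1]
    apply key
    refine foldl_rel
      (fun (a b : Int × Int) => a.2 = b.2 ∧ ((a.2 = -1 ∧ a.1 = 10000) ∨ (a.2 ≠ -1 ∧ a.1 = b.1 ∧ a.1 < 10000)))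
      _ _ _ ?step (10000, -1) (0, -1) (by norm_num)
    case step =>
      intro e he a b hab
      dsimp only
      obtain ⟨res, hres_eq, hnd, hbound, hcorr⟩ :=
        per_goal xP yP walls (PySem.List.pyGetD gs e (0, 0)).1 (PySem.List.pyGetD gs e (0, 0)).2
      rw [hres_eq, scan_res (PySem.List.pyGetD gs e (0, 0)) e res a hnd, hcorr (PySem.List.pyGetD gs e (0, 0))]
      have he0 : (0 : Int) ≤ e := (PySem.List.mem_pyRange_one.1 he).1
      obtain ⟨hab2, hcase⟩ := hab
      cases hfc : findCell res (PySem.List.pyGetD gs e (0, 0)) with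
      | none =>
        simp only [hfc, Option.map_none]
        exact ⟨hab2, hcase⟩
      | some k =>
        have hk : k.dP < 10000 := hbound k (findCell_mem hfc).1
        simp only [hfc, Option.map_some]
        rcases hcase with ⟨ha2, ha1⟩ | ⟨hne, hab1, hlt⟩
        · have hbeq : (b.2 == -1) = true := by
            rw [← hab2, ha2]; decide
          rw [ha1, if_pos (by omega : k.dP < (10000 : Int)), hbeq]
          simp only [Bool.true_or, if_true]
          refine ⟨?_, Or.inr ⟨?_, ?_, ?_⟩⟩ <;> first | rfl | trivial | omega | exact hk
        · have hbeq : (b.2 == -1) = false := by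
            rw [← hab2]
            simp only [beq_eq_false_iff_ne, ne_eq]
            exact hne
          rw [hbeq]
          simp only [Bool.false_or]
          by_cases hlt2 : k.dP < a.1
          · rw [if_pos hlt2]
            rw [show (decide (k.dP < b.1)) = true by simp [← hab1, hlt2], if_pos rfl]
            refine ⟨?_, Or.inr ⟨?_, ?_, ?_⟩⟩ <;> first | rfl | trivial | omega | exact hk
          · rw [if_neg hlt2]
            rw [show (decide (k.dP < b.1)) = false by simp [← hab1, hlt2]]
            simp only [Bool.false_eq_true, if_false]
            exact ⟨hab2, Or.inr ⟨hne, hab1, hlt⟩⟩
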